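-- pv_equiv track=rewrite | github.com/yelin1106/Guan-Yu | programmers/week6/hopscotch.py | solution
-- ===== SOURCE A (Python) =====
-- def solution(land):
--   answer = 0
--   for idx, l in enumerate(land):
--     if idx==0: continue
--     for i in range(len(l)):
--       l[i]+=max(land[idx-1][:i]+land[idx-1][i+1:])
--   answer=max(land[-1])
--   return answer
-- ===== SOURCE B (Python) =====
-- def solution(land):
--     # Note: unlike A, B does not mutate `land`; return value is identical.
--     prev = land[0]
--     for row in land[1:]:
--         m1 = m2 = None
--         k = -1
--         for i, v in enumerate(prev):
--             if m1 is None or v > m1: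
--                 m2, m1, k = m1, v, i
--             elif m2 is None or v > m2:
--                 m2 = v
--         prev = [v + (m2 if i == k else m1) for i, v in enumerate(row)]
--     return max(prev)
-- ===== Notes on version B (the rewrite author's own statement) =====
-- stated objective: faster
-- what changed: Instead of recomputing max over the previous row minus one column with list slicing for every cell (an O(w) scan and copy per cell), B finds the previous row's maximum, its first index and the runner-up in a single top-two streaming scan per row, then adds the runner-up at the argmax column and the maximum elsewhere.
import Mathlib
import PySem

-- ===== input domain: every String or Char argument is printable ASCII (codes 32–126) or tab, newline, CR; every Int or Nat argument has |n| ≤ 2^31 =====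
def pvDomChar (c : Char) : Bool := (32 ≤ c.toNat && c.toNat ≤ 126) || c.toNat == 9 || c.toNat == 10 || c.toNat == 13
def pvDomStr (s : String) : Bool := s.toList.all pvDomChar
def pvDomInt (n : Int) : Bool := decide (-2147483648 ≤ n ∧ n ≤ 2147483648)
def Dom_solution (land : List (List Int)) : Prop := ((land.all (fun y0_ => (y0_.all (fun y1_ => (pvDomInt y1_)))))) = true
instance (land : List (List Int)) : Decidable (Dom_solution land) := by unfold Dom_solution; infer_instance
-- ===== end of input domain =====

-- B replaces A's per-cell O(w) slice-and-rescan of the previous row by one streaming top-two scan per row (faster).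
-- A mutates `land` in place; B does not — the equivalence proved here is about the return value only.

-- ===== PORT A =====
-- max(xs): total shim; exact whenever xs ≠ [] (Pre_ guarantees every max() call A makes sees a nonempty list)
def pyMax (xs : List Int) : Int := (PySem.List.max? xs (fun y => y)).getD 0

-- inner loop body: l[i] += max(land[idx-1][:i] + land[idx-1][i+1:]); the row is rebuilt left to right
def solutionRow (prev l : List Int) : List Int :=
  (List.range l.length).map (fun i =>
    l.getD i 0 + pyMax (PySem.List.slice prev none (some (i : Int)) ++ PySem.List.slice prev (some ((i : Int) + 1)) none))

-- the enumerate loop: each row (after idx 0) is updated in place from the already-updated previous row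
def solutionGo : List Int → List (List Int) → List Int
  | prev, [] => prev
  | prev, l :: rest => solutionGo (solutionRow prev l) rest

def solution (land : List (List Int)) : Int :=
  match land with
  | [] => 0        -- Python: land[-1] raises IndexError here; excluded by Pre_solution
  | f :: rest => pyMax (solutionGo f rest)

-- ===== PORT B =====
-- the inner `for i, v in enumerate(prev)` body: state (m1, k, m2) with None → Option.none, k starts at -1
def topTwoStep (st : Option Int × Int × Option Int) (p : Int × Int) : Option Int × Int × Option Int :=
  match st, p with
  | (none, _, _), (i, v) => (some v, i, none)                    -- m1 is None: m2, m1, k = m1, v, i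
  | (some a, k, m2), (i, v) =>
    if a < v then (some v, i, some a)                            -- v > m1: m2, m1, k = m1, v, i
    else
      match m2 with
      | none => (some a, k, some v)                              -- m2 is None: m2 = v
      | some b => if b < v then (some a, k, some v) else (some a, k, some b)

-- `v + None` would be a TypeError in Python; the .getD 0 defaults fire only outside Pre_solution
def solution_alt (land : List (List Int)) : Int :=
  match land with
  | [] => 0        -- Python: land[0] raises IndexError here; excluded by Pre_solution
  | f :: rest =>
    let prev := rest.foldl (fun prev row =>
      let st := (PySem.List.enumerate prev).foldl topTwoStep (none, -1, none)
      (PySem.List.enumerate row).map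
        (fun p => p.2 + (if p.1 = st.2.1 then st.2.2.getD 0 else st.1.getD 0))) f
    (PySem.List.max? prev (fun y => y)).getD 0    -- max(prev); ValueError on [] is outside Pre_solution

-- ===== PRECONDITION & SPEC =====
-- Exactly the inputs where A returns: land nonempty, last row nonempty, and every row followed by a
-- nonempty row has length ≥ 2 (otherwise some max() in A sees an empty sequence and raises ValueError).
def Pre_solution (land : List (List Int)) : Prop :=
  land ≠ [] ∧ land.getLastD [] ≠ [] ∧ ∀ p ∈ land.zip land.tail, p.2 ≠ [] → 2 ≤ p.1.length
instance (land : List (List Int)) : Decidable (Pre_solution land) := by unfold Pre_solution; infer_instance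

def pvWitness_solution : List (List Int) := [[1, 2, 3, 5], [5, 6, 7, 8], [4, 3, 2, 1]]

def Spec_solution (land : List (List Int)) (out : Int) : Prop := out = solution_alt land
instance (land : List (List Int)) (out : Int) : Decidable (Spec_solution land out) := by unfold Spec_solution; infer_instance

-- ===== CLAIM (what is proved, stated in full; the proofs are below) =====
def Claim_equal_solution : Prop := ∀ (land : List (List Int)), Dom_solution land → Pre_solution land → Spec_solution land (solution land)

-- ===== LEMMAS AND PROOFS =====

def altRow (prev row : List Int) : List Int :=
  let st := (PySem.List.enumerate prev).foldl topTwoStep (none, -1, none)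
  (PySem.List.enumerate row).map
    (fun p => p.2 + (if p.1 = st.2.1 then st.2.2.getD 0 else st.1.getD 0))

lemma pyMax_eq {xs : List Int} {m : Int} (h1 : m ∈ xs) (h2 : ∀ y ∈ xs, y ≤ m) :
    pyMax xs = m := by
  obtain ⟨m', hm'⟩ : ∃ m', PySem.List.max? xs (fun y => y) = some m' := by
    cases hmax : PySem.List.max? xs (fun y => y) with
    | none =>
        exact absurd ((PySem.List.max?_eq_none_iff _ _).mp hmax)
          (by intro h; subst h; simp at h1)
    | some m' => exact ⟨m', rfl⟩
  have := h2 m' (PySem.List.max?_mem hm')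
  have := PySem.List.max?_isMax hm' m h1
  simp [pyMax, hm']; omega

lemma length_solutionRow (prev l : List Int) : (solutionRow prev l).length = l.length := by
  simp [solutionRow]

-- characterization of B's streaming top-two scan: m1 is the max, k its first index, m2 the max without column k
lemma topTwo_char (xs : List Int) (hne : xs ≠ []) :
    ∃ (m1 : Int) (k : Nat),
      (PySem.List.enumerate xs).foldl topTwoStep (none, -1, none)
        = (some m1, ((k : Int), if 2 ≤ xs.length then some (pyMax (xs.take k ++ xs.drop (k + 1))) else none))
      ∧ k < xs.length ∧ xs[k]? = some m1
      ∧ (∀ j, j < k → ∀ y ∈ xs[j]?, y < m1)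
      ∧ (∀ y ∈ xs, y ≤ m1) := by
  induction xs using List.reverseRecOn with
  | nil => exact absurd rfl hne
  | append_singleton xs x ih =>
    rcases List.eq_nil_or_concat' xs with rfl | -
    · refine ⟨x, 0, ?_⟩
      simp [PySem.List.enumerate, topTwoStep]
    by_cases hxs : xs = []
    · subst hxs
      refine ⟨x, 0, ?_⟩
      simp [PySem.List.enumerate, topTwoStep]
    obtain ⟨m1, k, hfold, hk, hget, hfirst, hub⟩ := ih hxs
    have hx1 : 1 ≤ xs.length := List.length_pos_of_ne_nil hxs
    rw [PySem.List.enumerate_append]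
    rw [List.foldl_append, hfold]
    simp only [PySem.List.enumerate, List.foldl_cons, List.foldl_nil]
    have hlen2 : 2 ≤ (xs ++ [x]).length := by simp; omega
    simp only [hlen2, if_pos]
    have hm1mem : m1 ∈ xs := List.mem_of_getElem? hget
    by_cases hcase : m1 < x
    · -- new max at the appended position
      refine ⟨x, xs.length, ?_, by simp, by simp, ?_, ?_⟩
      · have hrem : (xs ++ [x]).take xs.length ++ (xs ++ [x]).drop (xs.length + 1) = xs := by
          simp [List.drop_eq_nil_of_le]
        have hmx : pyMax xs = m1 := pyMax_eq hm1mem hub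
        rcases Nat.lt_or_ge xs.length 2 with h1 | h2
        · -- xs has a single element, so before this step m2 was None; branch `m2 is None`
          have : xs.length = 1 := by omega
          rw [topTwoStep.eq_def]
          simp [if_neg (by omega : ¬ 2 ≤ xs.length), if_pos hcase, hmx]
        · rw [topTwoStep.eq_def]
          simp [if_pos h2, if_pos hcase, hmx]
      · intro j hj y hy
        rcases Nat.lt_or_ge j xs.length with hlt | hge
        · rw [List.getElem?_append_left hlt] at hy
          have : y ∈ xs := List.mem_of_getElem? hy
          exact lt_of_le_of_lt (hub y this) hcase
        · omega
      · intro y hy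
        rcases List.mem_append.mp hy with h | h
        · exact le_of_lt (lt_of_le_of_lt (hub y h) hcase)
        · simp at h; omega
    · -- max and its index unchanged; x goes into the runner-up slot
      rw [not_lt] at hcase
      refine ⟨m1, k, ?_, by simp; omega, ?_, ?_, ?_⟩
      · have hrem : (xs ++ [x]).take k ++ (xs ++ [x]).drop (k + 1)
            = (xs.take k ++ xs.drop (k + 1)) ++ [x] := by
          rw [List.take_append_of_le_length (le_of_lt hk),
              List.drop_append_of_le_length (by omega), List.append_assoc]
        rcases Nat.lt_or_ge xs.length 2 with h1 | h2
        · -- xs = [m1]: previous m2 was None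
          have hx1' : xs.length = 1 := by omega
          have hk0 : k = 0 := by omega
          have hxseq : xs = [m1] := by
            have := List.ext_getElem? (l₁ := xs) (l₂ := [m1]) ?_
            · exact this
            · intro i
              match i, hx1', hk0, hget with
              | 0, _, _, hget => simpa using (by simpa [hk0] using hget)
              | (n+1), hx1', _, _ => simp [hx1']
          rw [topTwoStep.eq_def]
          have hremx : (xs.take k ++ xs.drop (k + 1)) ++ [x] = [x] := by
            simp [hk0, hxseq]
          simp only [if_neg (by omega : ¬ 2 ≤ xs.length)]
          simp [if_neg (by omega : ¬ m1 < x), hrem, hremx, pyMax, PySem.List.max?]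
        · have hrne : xs.take k ++ xs.drop (k + 1) ≠ [] := by
            have : (xs.take k ++ xs.drop (k + 1)).length = xs.length - 1 := by
              simp [List.length_take, List.length_drop]; omega
            intro hc; rw [hc] at this; simp at this; omega
          obtain ⟨m2, hm2⟩ : ∃ m2, PySem.List.max? (xs.take k ++ xs.drop (k + 1)) (fun y => y) = some m2 := by
            cases hmax : PySem.List.max? (xs.take k ++ xs.drop (k + 1)) (fun y => y) with
            | none => exact absurd ((PySem.List.max?_eq_none_iff _ _).mp hmax) hrne
            | some m2 => exact ⟨m2, rfl⟩
          have hm2mem := PySem.List.max?_mem hm2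
          have hm2ub := fun y hy => PySem.List.max?_isMax hm2 y hy
          have hpm2 : pyMax (xs.take k ++ xs.drop (k + 1)) = m2 := by simp [pyMax, hm2]
          rw [topTwoStep.eq_def]
          simp only [if_pos h2, hpm2]
          by_cases hbx : m2 < x
          · have : pyMax ((xs.take k ++ xs.drop (k + 1)) ++ [x]) = x :=
              pyMax_eq (by simp) (by
                intro y hy
                rcases List.mem_append.mp hy with h | h
                · exact le_of_lt (lt_of_le_of_lt (hm2ub y h) hbx)
                · simp at h; omega)
            simp only [if_neg (by omega : ¬ m1 < x), if_pos hbx, hrem]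
            rw [this]
          · have : pyMax ((xs.take k ++ xs.drop (k + 1)) ++ [x]) = m2 :=
              pyMax_eq (List.mem_append_left _ hm2mem) (by
                intro y hy
                rcases List.mem_append.mp hy with h | h
                · exact hm2ub y h
                · simp at h; omega)
            simp only [if_neg (by omega : ¬ m1 < x), if_neg (by omega : ¬ m2 < x), hrem]
            rw [this]
      · rw [List.getElem?_append_left hk]; exact hget
      · intro j hj y hy
        rw [List.getElem?_append_left (by omega)] at hy
        exact hfirst j hj y hy
      · intro y hy
        rcases List.mem_append.mp hy with h | h
        · exact hub y h
        · simp at h; omega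

-- the core fact about A: for a previous row of length ≥ 2, max of the row minus column j is
-- the runner-up if j is the first argmax position, the maximum otherwise
lemma maxRemoved_eq (prev : List Int) (h2 : 2 ≤ prev.length) (j : Nat) :
    pyMax (PySem.List.slice prev none (some (j : Int)) ++ PySem.List.slice prev (some ((j : Int) + 1)) none)
      = (if j = (PySem.List.index? prev (pyMax prev)).getD 0
         then pyMax (prev.take ((PySem.List.index? prev (pyMax prev)).getD 0)
              ++ prev.drop ((PySem.List.index? prev (pyMax prev)).getD 0 + 1))
         else pyMax prev) := by
  have hne : prev ≠ [] := by intro h; subst h; simp at h2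
  obtain ⟨m, hm⟩ : ∃ m, PySem.List.max? prev (fun y => y) = some m := by
    cases hmax : PySem.List.max? prev (fun y => y) with
    | none => exact absurd ((PySem.List.max?_eq_none_iff _ _).mp hmax) hne
    | some m => exact ⟨m, rfl⟩
  have hpm : pyMax prev = m := by simp [pyMax, hm]
  have hmem : m ∈ prev := PySem.List.max?_mem hm
  have hmaxall : ∀ y ∈ prev, y ≤ m := fun y hy => PySem.List.max?_isMax hm y hy
  obtain ⟨k, hk⟩ : ∃ k, PySem.List.index? prev (pyMax prev) = some k := by
    rw [hpm]
    exact Option.isSome_iff_exists.mp ((PySem.List.index?_isSome_iff _ _).mpr hmem)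
  obtain ⟨hklt, hpk, -⟩ := PySem.List.getElem_of_index?_eq_some (hpm ▸ hk)
  rw [hk]
  simp only [Option.getD_some]
  have hcast : ((j : Int) + 1) = (((j + 1 : Nat)) : Int) := by push_cast; ring
  rw [PySem.List.slice_to_natCast, hcast, PySem.List.slice_from_natCast]
  by_cases hjk : j = k
  · subst hjk; simp
  · rw [if_neg hjk, hpm]
    have hRsub : prev.take j ++ prev.drop (j + 1) ⊆ prev :=
      List.append_subset.mpr ⟨List.take_subset _ _, List.drop_subset _ _⟩
    have hmR : m ∈ prev.take j ++ prev.drop (j + 1) := by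
      rcases Nat.lt_or_ge k j with hlt | hge
      · refine List.mem_append_left _ (List.mem_of_getElem? (i := k) ?_)
        rw [List.getElem?_take_of_lt hlt, List.getElem?_eq_getElem hklt, hpk]
      · have hge1 : j + 1 ≤ k := by omega
        refine List.mem_append_right _ (List.mem_of_getElem? (i := k - (j + 1)) ?_)
        have heq : (j + 1) + (k - (j + 1)) = k := by omega
        rw [List.getElem?_drop, heq, List.getElem?_eq_getElem hklt, hpk]
    exact pyMax_eq hmR (fun y hy => hmaxall y (hRsub hy))

lemma row_eq (prev l : List Int) (h : l ≠ [] → 2 ≤ prev.length) :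
    solutionRow prev l = altRow prev l := by
  by_cases hl : l = []
  · subst hl; simp [solutionRow, altRow, PySem.List.enumerate]
  · have h2 := h hl
    have hne : prev ≠ [] := by intro hc; subst hc; simp at h2
    obtain ⟨m1, k, hfold, hklt, hget, hfirst, hub⟩ := topTwo_char prev hne
    have hm1 : pyMax prev = m1 := pyMax_eq (List.mem_of_getElem? hget) hub
    have hidx : PySem.List.index? prev m1 = some k := by
      rw [PySem.List.index?_eq_some_iff]
      refine ⟨prev.take k, prev.drop (k + 1), ?_, by simp [List.length_take]; omega, ?_⟩
      · conv_lhs => rw [← List.take_append_drop k prev]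
        congr 1
        rw [List.drop_eq_getElem_cons hklt]
        simp [List.getElem?_eq_getElem hklt] at hget
        rw [hget]
      · intro hc
        obtain ⟨j, hj, hgj⟩ := List.getElem_of_mem hc
        have hjk : j < k := by have := List.length_take_le k prev; omega
        have := hfirst j hjk m1 (by
          rw [List.getElem?_eq_getElem (by omega)]
          rw [← hgj, List.getElem_take]
          simp)
        omega
    unfold altRow
    rw [hfold]
    apply List.ext_getElem
    · simp [solutionRow, PySem.List.length_enumerate]
    · intro i hi1 hi2
      have hil : i < l.length := by simpa [solutionRow] using hi1
      simp only [solutionRow, List.getElem_map, List.getElem_range, PySem.List.getElem_enumerate]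
      rw [maxRemoved_eq prev h2 i, hm1, hidx]
      simp only [Option.getD_some, if_pos h2]
      have hgd : l.getD i 0 = l[i] := List.getD_eq_getElem l 0 hil
      by_cases hik : i = k
      · simp [hik, List.getElem?_eq_getElem (show k < l.length from hik ▸ hil)]
      · have : ¬ ((i : Int) = (k : Int)) := by exact_mod_cast hik
        simp [hik, this, List.getElem?_eq_getElem hil]

lemma go_eq (f : List Int) (rest : List (List Int))
    (h : ∀ p ∈ (f :: rest).zip rest, p.2 ≠ [] → 2 ≤ p.1.length) :
    solutionGo f rest = rest.foldl (fun prev row => altRow prev row) f := by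
  induction rest generalizing f with
  | nil => rfl
  | cons l rest' ih =>
    have hfl : l ≠ [] → 2 ≤ f.length := h (f, l) (by simp)
    show solutionGo (solutionRow f l) rest' = rest'.foldl _ (altRow f l)
    rw [← row_eq f l hfl]
    apply ih
    intro p hp
    cases rest' with
    | nil => simp at hp
    | cons r rest'' =>
      simp only [List.zip_cons_cons, List.mem_cons] at hp
      rcases hp with rfl | hp
      · intro hr
        have := h (l, r) (by simp)
        simpa [length_solutionRow] using this hr
      · exact h p (by simp [hp])

-- ===== VERDICT (by name: the statement is the Claim_ definition above) =====
theorem solution_spec : Claim_equal_solution := by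
  intro land _ hpre
  unfold Spec_solution
  obtain ⟨hne, _, hpairs⟩ := hpre
  match land with
  | [] => exact absurd rfl hne
  | f :: rest =>
    simp only [solution, solution_alt]
    rw [go_eq f rest (by simpa using hpairs)]
    rfl
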